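-- pv_equiv track=rewrite | github.com/dwharve/Pythonium | pythonium/syntax_repair.py | _detect_indent_size
-- ===== SOURCE A (Python) =====
-- from typing import List, Tuple, Optional, Dict, Any, Set
--
-- def _detect_indent_size(lines: List[str]) -> int:
--     """Detect the indentation size used in the code."""
--     indents = []
--
--     for line in lines:
--         stripped = line.lstrip()
--         if stripped and not stripped.startswith('#'):
--             indent = len(line) - len(stripped)
--             if indent > 0:
--                 indents.append(indent)
--
--     if not indents:
--         return 4  # Default to 4 spaces
--
--     # Find the most common non-zero indent
--     from collections import Counter
--     indent_counts = Counter(indents)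
--
--     # Look for multiples of 2, 4, or 8
--     for size in [2, 4, 8]:
--         if any(indent % size == 0 for indent in indents):
--             return size
--
--     return 4  # Default fallback
-- ===== SOURCE B (Python) =====
-- def _detect_indent_size(lines):
--     """Detect the indentation size used in the code."""
--     # Any qualifying even indent means size 2; otherwise (including no indents) 4.
--     for line in lines:
--         stripped = line.lstrip()
--         if not stripped or stripped.startswith('#'):
--             continue
--         indent = len(line) - len(stripped)
--         if indent > 0 and indent % 2 == 0:
--             return 2
--     return 4
-- ===== Notes on version B (the rewrite author's own statement) =====
-- stated objective: simpler
-- what changed: B replaces A's collect-indents list, dead Counter, and three-pass any() scan over [2,4,8] with a single early-returning pass: return 2 at the first qualifying even indent, else 4 (A's 4- and 8-checks are unreachable since divisibility by 4 or 8 implies evenness).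
import Mathlib
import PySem

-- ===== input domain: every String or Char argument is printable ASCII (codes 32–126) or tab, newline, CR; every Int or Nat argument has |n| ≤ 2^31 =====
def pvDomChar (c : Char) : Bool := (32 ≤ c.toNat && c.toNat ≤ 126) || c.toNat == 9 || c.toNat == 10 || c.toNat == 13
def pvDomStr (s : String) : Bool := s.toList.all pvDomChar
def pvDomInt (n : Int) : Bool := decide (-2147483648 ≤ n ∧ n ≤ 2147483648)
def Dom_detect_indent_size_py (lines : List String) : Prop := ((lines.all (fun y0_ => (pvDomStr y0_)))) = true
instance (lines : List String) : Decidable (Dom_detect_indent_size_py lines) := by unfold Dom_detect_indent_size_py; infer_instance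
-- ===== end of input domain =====

-- B drops the indents list, the dead Counter and the three any() scans for one early-exit pass (simpler; same results).

-- ===== PORT A =====
def detect_indent_size_py (lines : List String) : Int :=
  let indents : List Int := lines.foldl (fun acc line =>
      let stripped := PySem.Str.lstrip line
      if stripped ≠ "" ∧ PySem.Str.startswith stripped "#" = false then
        let indent := PySem.Str.len line - PySem.Str.len stripped
        if indent > 0 then acc ++ [indent] else acc
      else acc) []
  if indents = [] then 4
  else
    let _indent_counts := PySem.Dict.counter indents  -- Counter(indents); unused by A, kept faithfully
    match ([2, 4, 8] : List Int).find? (fun size => indents.any (fun indent => PySem.Int.mod indent size == 0)) with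
    | some size => size
    | none => 4

-- ===== PORT B =====
def detect_indent_size_py_alt (lines : List String) : Int :=
  match lines with
  | [] => 4
  | line :: rest =>
    let stripped := PySem.Str.lstrip line
    if stripped = "" ∨ PySem.Str.startswith stripped "#" = true then
      detect_indent_size_py_alt rest
    else
      let indent := PySem.Str.len line - PySem.Str.len stripped
      if indent > 0 ∧ PySem.Int.mod indent 2 = 0 then 2
      else detect_indent_size_py_alt rest

-- ===== PRECONDITION & SPEC =====
def Spec_detect_indent_size_py (lines : List String) (out : Int) : Prop := out = detect_indent_size_py_alt lines
instance (lines : List String) (out : Int) : Decidable (Spec_detect_indent_size_py lines out) := by unfold Spec_detect_indent_size_py; infer_instance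

-- ===== CLAIM (what is proved, stated in full; the proofs are below) =====
def Claim_equal_detect_indent_size_py : Prop := ∀ (lines : List String), Dom_detect_indent_size_py lines → Spec_detect_indent_size_py lines (detect_indent_size_py lines)

-- ===== LEMMAS AND PROOFS =====

-- one line's contribution to A's indents list
def pvContrib (line : String) : List Int :=
  let stripped := PySem.Str.lstrip line
  if stripped ≠ "" ∧ PySem.Str.startswith stripped "#" = false then
    let indent := PySem.Str.len line - PySem.Str.len stripped
    if indent > 0 then [indent] else []
  else []

def pvStepA (acc : List Int) (line : String) : List Int :=
  let stripped := PySem.Str.lstrip line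
  if stripped ≠ "" ∧ PySem.Str.startswith stripped "#" = false then
    let indent := PySem.Str.len line - PySem.Str.len stripped
    if indent > 0 then acc ++ [indent] else acc
  else acc

lemma pvStepA_eq (acc : List Int) (line : String) :
    pvStepA acc line = acc ++ pvContrib line := by
  unfold pvStepA pvContrib
  by_cases h1 : PySem.Str.lstrip line ≠ "" ∧ PySem.Str.startswith (PySem.Str.lstrip line) "#" = false
  · rw [if_pos h1, if_pos h1]
    by_cases h2 : PySem.Str.len line - PySem.Str.len (PySem.Str.lstrip line) > 0
    · rw [if_pos h2, if_pos h2]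
    · rw [if_neg h2, if_neg h2, List.append_nil]
  · rw [if_neg h1, if_neg h1, List.append_nil]

lemma pvFoldl_eq (lines : List String) (acc : List Int) :
    lines.foldl pvStepA acc = acc ++ lines.foldl pvStepA [] := by
  induction lines generalizing acc with
  | nil => simp
  | cons l ls ih =>
    simp only [List.foldl_cons, pvStepA_eq, List.nil_append]
    rw [ih (acc ++ pvContrib l), ih (pvContrib l), List.append_assoc]

-- A's indents list, characterised structurally
def pvIndents (lines : List String) : List Int := lines.foldl pvStepA []

lemma pvIndents_cons (l : String) (ls : List String) :
    pvIndents (l :: ls) = pvContrib l ++ pvIndents ls := by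
  unfold pvIndents
  simp only [List.foldl_cons, pvStepA_eq, List.nil_append]
  exact pvFoldl_eq ls (pvContrib l)

def pvEven (i : Int) : Bool := PySem.Int.mod i 2 == 0

-- if no indent is even, none is divisible by 4 or 8 either
lemma pvNoEven (I : List Int) (h : I.any pvEven = false) (s : Int)
    (hs : s = 4 ∨ s = 8) : I.any (fun i => PySem.Int.mod i s == 0) = false := by
  simp only [List.any_eq_false] at h ⊢
  intro i hi hmod
  have h2 := h i hi
  rw [beq_iff_eq, PySem.Int.mod_eq_zero_iff_dvd] at hmod
  apply h2
  rw [pvEven, beq_iff_eq, PySem.Int.mod_eq_zero_iff_dvd]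
  rcases hs with rfl | rfl
  · exact dvd_trans ⟨2, rfl⟩ hmod
  · exact dvd_trans ⟨4, rfl⟩ hmod

lemma pvA_char (lines : List String) :
    detect_indent_size_py lines = if (pvIndents lines).any pvEven then 2 else 4 := by
  unfold detect_indent_size_py
  have hI : lines.foldl (fun acc line =>
      let stripped := PySem.Str.lstrip line
      if stripped ≠ "" ∧ PySem.Str.startswith stripped "#" = false then
        let indent := PySem.Str.len line - PySem.Str.len stripped
        if indent > 0 then acc ++ [indent] else acc
      else acc) [] = pvIndents lines := rfl
  rw [hI]
  by_cases hnil : pvIndents lines = []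
  · rw [if_pos hnil, hnil]
    simp
  · rw [if_neg hnil]
    by_cases he : (pvIndents lines).any pvEven = true
    · rw [List.find?_cons_of_pos (by exact he), if_pos he]
    · have he' : (pvIndents lines).any pvEven = false := by
        exact Bool.eq_false_iff.mpr he
      have h4 := pvNoEven _ he' 4 (Or.inl rfl)
      have h8 := pvNoEven _ he' 8 (Or.inr rfl)
      rw [List.find?_cons_of_neg (by intro hc; exact Bool.noConfusion (he'.symm.trans hc)),
          List.find?_cons_of_neg (by intro hc; exact Bool.noConfusion (h4.symm.trans hc)),
          List.find?_cons_of_neg (by intro hc; exact Bool.noConfusion (h8.symm.trans hc)),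
          List.find?_nil, if_neg he]

lemma pvB_char (lines : List String) :
    detect_indent_size_py_alt lines = if (pvIndents lines).any pvEven then 2 else 4 := by
  induction lines with
  | nil => simp [detect_indent_size_py_alt, pvIndents]
  | cons l ls ih =>
    rw [pvIndents_cons, List.any_append]
    show (let stripped := PySem.Str.lstrip l;
      if stripped = "" ∨ PySem.Str.startswith stripped "#" = true then
        detect_indent_size_py_alt ls
      else
        let indent := PySem.Str.len l - PySem.Str.len stripped;
        if indent > 0 ∧ PySem.Int.mod indent 2 = 0 then 2
        else detect_indent_size_py_alt ls) = _
    unfold pvContrib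
    dsimp only
    generalize PySem.Str.lstrip l = s
    simp only [PySem.Str.len_eq]
    by_cases h1 : s = "" ∨ PySem.Str.startswith s "#" = true
    · have h2 : ¬ (s ≠ "" ∧ PySem.Str.startswith s "#" = false) := by
        intro hc
        rcases h1 with h | h
        · exact hc.1 h
        · rw [hc.2] at h; exact Bool.noConfusion h
      rw [if_pos h1, if_neg h2, ih]
      simp
    · have h2 : s ≠ "" ∧ PySem.Str.startswith s "#" = false := by
        rcases not_or.mp h1 with ⟨ha, hb⟩
        exact ⟨ha, Bool.eq_false_iff.mpr hb⟩
      rw [if_neg h1, if_pos h2]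
      by_cases hq : (l.toList.length : Int) - (s.toList.length : Int) > 0 ∧
          PySem.Int.mod ((l.toList.length : Int) - (s.toList.length : Int)) 2 = 0
      · rw [if_pos hq, if_pos hq.1]
        have hev : pvEven ((l.length : Int) - (s.length : Int)) = true := by
          simp only [pvEven, beq_iff_eq]
          exact hq.2
        simp [hev]
      · rw [if_neg hq, ih]
        by_cases hpos : (l.toList.length : Int) - (s.toList.length : Int) > 0
        · have hodd : pvEven ((l.length : Int) - (s.length : Int)) = false := by
            simp only [pvEven, beq_eq_false_iff_ne, ne_eq]
            exact fun h => hq ⟨hpos, h⟩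
          rw [if_pos hpos]
          simp [hodd]
        · rw [if_neg hpos]
          simp

-- ===== VERDICT (by name: the statement is the Claim_ definition above) =====
theorem detect_indent_size_py_spec : Claim_equal_detect_indent_size_py := by
  intro lines _
  unfold Spec_detect_indent_size_py
  rw [pvA_char, pvB_char]
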